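-- pv_equiv track=rewrite | github.com/wsgan001/repeated_pattern_discovery | algorithms.py | compute_mtps
-- ===== SOURCE A (Python) =====
-- def compute_mtps(v, d):
--     """ This implements the function in [Meredith2002] Fig. 18.
--         Instead of printing out the MTPs they are returned as a list of doubles. """
--
--     mtps = []
--
--     i = 0
--
--     while i < len(v):
--         trans_vector = v[i][0]
--         pattern = []
--         pattern.append(d[v[i][1]])
--
--         j = i + 1
--         while j < len(v) and v[j][0] == v[i][0]:
--             pattern.append(d[v[j][1]])
--             j += 1
--
--         i = j
--         mtps.append((trans_vector, pattern))
--
--     return mtps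
-- ===== SOURCE B (Python) =====
-- def compute_mtps(v, d):
--     """Build the MTP list back-to-front: walk v in reverse, merging each entry
--     into the front group when its translation vector matches, otherwise
--     starting a new front group."""
--     mtps = []
--     for tv, idx in reversed(v):
--         val = d[idx]
--         if mtps and mtps[0][0] == tv:
--             mtps[0] = (tv, [val] + mtps[0][1])
--         else:
--             mtps[0:0] = [(tv, [val])]
--     return mtps
-- ===== Notes on version B (the rewrite author's own statement) =====
-- stated objective: alternative
-- what changed: Builds the result back-to-front: a single reverse elementwise pass that merges each entry into the current front group (or opens a new one), instead of A's two nested index-advancing while loops that consume each run forward.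
import Mathlib
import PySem

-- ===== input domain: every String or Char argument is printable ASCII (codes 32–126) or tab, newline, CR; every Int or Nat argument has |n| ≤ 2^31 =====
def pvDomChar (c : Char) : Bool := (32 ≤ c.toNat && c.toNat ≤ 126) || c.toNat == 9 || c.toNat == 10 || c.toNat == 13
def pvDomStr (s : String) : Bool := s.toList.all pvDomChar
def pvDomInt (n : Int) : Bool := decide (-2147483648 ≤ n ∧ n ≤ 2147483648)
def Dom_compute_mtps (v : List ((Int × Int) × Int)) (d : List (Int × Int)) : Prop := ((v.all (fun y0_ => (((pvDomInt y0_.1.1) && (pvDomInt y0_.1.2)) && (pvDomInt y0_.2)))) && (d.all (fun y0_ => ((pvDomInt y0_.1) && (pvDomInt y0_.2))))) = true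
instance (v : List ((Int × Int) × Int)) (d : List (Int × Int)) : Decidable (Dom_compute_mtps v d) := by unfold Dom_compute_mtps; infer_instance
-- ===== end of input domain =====

-- B builds the result back-to-front: one reverse elementwise pass merging each entry
-- into the front group, instead of A's nested forward index-advancing while loops.

-- shared tiny helper: d[idx] (Python indexing, negative from the end);
-- the default is never reached under Pre_compute_mtps
def pvGet (d : List (Int × Int)) (idx : Int) : Int × Int :=
  (PySem.List.pyGet? d idx).getD (0, 0)

-- ===== PORT A =====
-- inner while loop: 'while j < len(v) and v[j][0] == v[i][0]: pattern.append(d[v[j][1]]); j += 1'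
-- (fuel only makes the loop structurally total; with fuel ≥ len(v) - j it never runs out)
def computeInnerA (v : List ((Int × Int) × Int)) (d : List (Int × Int))
    (key : Int × Int) (pattern : List (Int × Int)) (j : Nat) : Nat → Nat × List (Int × Int)
  | 0 => (j, pattern)
  | fuel + 1 =>
    if h : j < v.length then
      if v[j].1 == key then
        computeInnerA v d key (pattern ++ [pvGet d v[j].2]) (j + 1) fuel
      else (j, pattern)
    else (j, pattern)

-- outer while loop over i (same fuel discipline: fuel ≥ len(v) - i suffices)
def computeOuterA (v : List ((Int × Int) × Int)) (d : List (Int × Int)) (i : Nat) :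
    Nat → List ((Int × Int) × (List (Int × Int)))
  | 0 => []
  | fuel + 1 =>
    if h : i < v.length then
      let trans_vector := v[i].1
      let r := computeInnerA v d trans_vector [pvGet d v[i].2] (i + 1) (v.length - (i + 1))
      (trans_vector, r.2) :: computeOuterA v d r.1 fuel
    else []

def compute_mtps (v : List ((Int × Int) × Int)) (d : List (Int × Int)) :
    List ((Int × Int) × (List (Int × Int))) :=
  computeOuterA v d 0 v.length

-- ===== PORT B =====
-- loop body of Source B: merge one entry (taken from the reversed traversal) into the
-- front of the accumulated list
def stepB (d : List (Int × Int)) (mtps : List ((Int × Int) × List (Int × Int)))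
    (e : (Int × Int) × Int) : List ((Int × Int) × List (Int × Int)) :=
  match mtps with
  | (k, p) :: rest =>
    if k == e.1 then (k, pvGet d e.2 :: p) :: rest
    else (e.1, [pvGet d e.2]) :: (k, p) :: rest
  | [] => [(e.1, [pvGet d e.2])]

-- 'for tv, idx in reversed(v): …' with accumulator mtps
def compute_mtps_alt (v : List ((Int × Int) × Int)) (d : List (Int × Int)) :
    List ((Int × Int) × (List (Int × Int))) :=
  v.reverse.foldl (stepB d) []

-- ===== PRECONDITION & SPEC =====
-- Pre_ excludes exactly the inputs where some index v[k][1] is out of range for d,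
-- on which Python A raises IndexError (B raises there too).
def Pre_compute_mtps (v : List ((Int × Int) × Int)) (d : List (Int × Int)) : Prop :=
  ∀ e ∈ v, PySem.Raise.InRange d.length e.2
instance (v : List ((Int × Int) × Int)) (d : List (Int × Int)) : Decidable (Pre_compute_mtps v d) := by unfold Pre_compute_mtps; infer_instance

def pvWitness_compute_mtps : (List ((Int × Int) × Int)) × (List (Int × Int)) :=
  ([((1, 0), 0), ((1, 0), 1), ((0, 2), 0)], [(3, 4), (5, 6)])

def Spec_compute_mtps (v : List ((Int × Int) × Int)) (d : List (Int × Int)) (out : List ((Int × Int) × (List (Int × Int)))) : Prop := out = compute_mtps_alt v d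
instance (v : List ((Int × Int) × Int)) (d : List (Int × Int)) (out : List ((Int × Int) × (List (Int × Int)))) : Decidable (Spec_compute_mtps v d out) := by unfold Spec_compute_mtps; infer_instance

-- ===== CLAIM (what is proved, stated in full; the proofs are below) =====
def Claim_equal_compute_mtps : Prop := ∀ (v : List ((Int × Int) × Int)) (d : List (Int × Int)), Dom_compute_mtps v d → Pre_compute_mtps v d → Spec_compute_mtps v d (compute_mtps v d)

-- ===== LEMMAS AND PROOFS =====

-- proof-only middleman: maximal runs of equal first components
def groupRuns : List ((Int × Int) × Int) → List ((Int × Int) × List ((Int × Int) × Int))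
  | [] => []
  | e :: rest =>
    (e.1, e :: rest.takeWhile (fun x => x.1 == e.1)) ::
      groupRuns (rest.dropWhile (fun x => x.1 == e.1))
termination_by l => l.length
decreasing_by
  have := List.Sublist.length_le (List.dropWhile_sublist (l := rest) (p := fun x => x.1 == e.1))
  simp; omega

def mapGroup (d : List (Int × Int)) (g : (Int × Int) × List ((Int × Int) × Int)) :
    (Int × Int) × List (Int × Int) :=
  (g.1, g.2.map (fun e => pvGet d e.2))

theorem dropWhile_eq_drop_length_takeWhile {α : Type} (p : α → Bool) (l : List α) :
    l.dropWhile p = l.drop (l.takeWhile p).length := by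
  induction l with
  | nil => rfl
  | cons a l ih =>
    by_cases h : p a
    · simp [h, ih]
    · simp [h]

-- the inner while loop computes takeWhile of the tail starting at j
theorem computeInnerA_eq (v : List ((Int × Int) × Int)) (d : List (Int × Int))
    (key : Int × Int) (fuel : Nat) :
    ∀ (pattern : List (Int × Int)) (j : Nat), v.length - j ≤ fuel →
    computeInnerA v d key pattern j fuel =
      (j + ((v.drop j).takeWhile (fun x => x.1 == key)).length,
       pattern ++ ((v.drop j).takeWhile (fun x => x.1 == key)).map (fun e => pvGet d e.2)) := by
  induction fuel with
  | zero =>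
    intro pattern j hf
    have : v.drop j = [] := List.drop_eq_nil_of_le (by omega)
    simp [computeInnerA, this]
  | succ fuel ih =>
    intro pattern j hf
    by_cases h : j < v.length
    · have hdrop : v.drop j = v[j] :: v.drop (j + 1) :=
        List.drop_eq_getElem_cons h
      by_cases hk : (v[j].1 == key) = true
      · rw [computeInnerA, dif_pos h, if_pos hk, ih _ _ (by omega), hdrop,
          List.takeWhile_cons]
        simp [hk]; omega
      · rw [computeInnerA, dif_pos h, if_neg hk, hdrop, List.takeWhile_cons]
        simp [hk]
    · have : v.drop j = [] := List.drop_eq_nil_of_le (by omega)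
      rw [computeInnerA, dif_neg h]
      simp [this]

-- the outer loop of A from index i equals the run decomposition of v.drop i
theorem computeOuterA_eq (v : List ((Int × Int) × Int)) (d : List (Int × Int)) (fuel : Nat) :
    ∀ i : Nat, v.length - i ≤ fuel →
    computeOuterA v d i fuel = (groupRuns (v.drop i)).map (mapGroup d) := by
  induction fuel with
  | zero =>
    intro i hf
    have : v.drop i = [] := List.drop_eq_nil_of_le (by omega)
    rw [this, groupRuns]
    simp [computeOuterA]
  | succ fuel ih =>
    intro i hf
    by_cases h : i < v.length
    · rw [computeOuterA]
      simp only [dif_pos h]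
      have hdrop : v.drop i = v[i] :: v.drop (i + 1) :=
        List.drop_eq_getElem_cons h
      rw [computeInnerA_eq v d _ _ _ _ (by omega)]
      have htw : ((v.drop (i + 1)).takeWhile (fun x => x.1 == v[i].1)).length
          ≤ v.length - (i + 1) := by
        have h1 := List.Sublist.length_le
          (List.takeWhile_sublist (l := v.drop (i + 1)) (p := fun x => x.1 == v[i].1))
        simp at h1; omega
      rw [hdrop, groupRuns]
      dsimp only [mapGroup]
      simp only [List.map_cons, List.singleton_append]
      refine congrArg₂ List.cons rfl ?_
      rw [ih _ (by omega)]
      rw [dropWhile_eq_drop_length_takeWhile, List.drop_drop]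
    · have : v.drop i = [] := List.drop_eq_nil_of_le (by omega)
      rw [computeOuterA, dif_neg h, this, groupRuns]
      simp

-- folding one homogeneous run (all keys = k) into an accumulator whose head key ≠ k
theorem foldr_stepB_run (d : List (Int × Int)) (k : Int × Int)
    (xs : List ((Int × Int) × Int)) (acc : List ((Int × Int) × List (Int × Int)))
    (hxs : ∀ x ∈ xs, x.1 = k)
    (hacc : ∀ p rest, acc = (k, p) :: rest → False) :
    List.foldr (fun e m => stepB d m e) acc xs =
      if xs.isEmpty then acc else (k, xs.map (fun e => pvGet d e.2)) :: acc := by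
  induction xs with
  | nil => simp
  | cons x xs ih =>
    have hx : x.1 = k := hxs x (by simp)
    have ih' := ih (fun y hy => hxs y (by simp [hy]))
    simp only [List.foldr_cons, ih']
    by_cases hxe : xs.isEmpty
    · have hxnil : xs = [] := List.isEmpty_iff.mp hxe
      simp only [hxe, if_true]
      cases acc with
      | nil => simp [stepB, hx, hxnil]
      | cons a rest =>
        obtain ⟨ka, pa⟩ := a
        have hne : ¬ (ka = k) := fun hk => hacc pa rest (by rw [hk])
        simp [stepB, hx, hne, hxnil]
    · simp only [hxe]
      simp [stepB, hx]

-- B equals the run decomposition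
theorem foldB_eq_groupRuns (d : List (Int × Int)) (v : List ((Int × Int) × Int)) :
    List.foldr (fun e m => stepB d m e) [] v = (groupRuns v).map (mapGroup d) := by
  fun_induction groupRuns v with
  | case1 => simp
  | case2 e rest ih =>
    have hsplit : e :: rest =
        (e :: rest.takeWhile (fun x => x.1 == e.1)) ++ rest.dropWhile (fun x => x.1 == e.1) := by
      simp [List.takeWhile_append_dropWhile]
    conv_lhs => rw [hsplit]
    rw [List.foldr_append, ih]
    have hrun : ∀ x ∈ e :: rest.takeWhile (fun x => x.1 == e.1), x.1 = e.1 := by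
      intro x hx
      rw [List.mem_cons] at hx
      rcases hx with rfl | hx
      · rfl
      · have := List.mem_takeWhile_imp (by exact hx)
        simpa using this
    have hacc : ∀ p r,
        (groupRuns (rest.dropWhile (fun x => x.1 == e.1))).map (mapGroup d) = (e.1, p) :: r → False := by
      intro p r hEq
      cases hd : rest.dropWhile (fun x => x.1 == e.1) with
      | nil => rw [hd] at hEq; simp [groupRuns] at hEq
      | cons y ys =>
        have hy : ¬ (y.1 == e.1) = true := by
          have := List.head_dropWhile_not (p := fun x => x.1 == e.1) (l := rest)
            (by simp [hd])
          simpa [hd] using this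
        rw [hd, groupRuns] at hEq
        simp [mapGroup] at hEq
        exact hy (by simp [hEq.1])
    rw [foldr_stepB_run d e.1 _ _ hrun hacc]
    simp [mapGroup]

-- ===== VERDICT (by name: the statement is the Claim_ definition above) =====
theorem compute_mtps_spec : Claim_equal_compute_mtps := by
  intro v d _ _
  unfold Spec_compute_mtps compute_mtps compute_mtps_alt
  rw [List.foldl_reverse, foldB_eq_groupRuns]
  simpa using computeOuterA_eq v d v.length 0 (by omega)
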